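-- pv_equiv track=rewrite | github.com/vineethkv7736/Vocal-Bridge | backend/main.py | categorize_words
-- ===== SOURCE A (Python) =====
-- SYMPTOM_WORDS = ['pain', 'headache', 'fever', 'nausea', 'dizzy', 'tired', 'cough', 'cold', 'flu', 'throat', 'chest', 'breathing', 'stomach', 'back', 'knee', 'shoulder', 'hurt', 'sick', 'bad', 'worse']
--
-- TREATMENT_WORDS = ['medication', 'treatment', 'surgery', 'prescription', 'recovery', 'medicine', 'help', 'better']
--
-- MEDICAL_PERSONNEL = ['doctor', 'nurse', 'hospital', 'emergency']
--
-- BODY_PARTS = ['heart', 'lungs', 'throat', 'blood', 'pressure', 'head', 'body']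
--
-- ACTION_WORDS = ['need', 'want', 'go', 'get', 'make', 'cannot', 'sleep', 'wake', 'work', 'move', 'walk', 'swallow', 'spin']
--
-- TIME_WORDS = ['yesterday', 'today', 'morning', 'night', 'week', 'now', 'start', 'continue']
--
-- SEVERITY_WORDS = ['very', 'too', 'much', 'high', 'hard', 'urgent']
--
-- LOCATION_WORDS = ['pharmacy', 'hospital', 'emergency', 'room']
--
-- def categorize_words(words):
--     """Categorize medical words into different types"""
--     symptoms = []
--     treatments = []
--     personnel = []
--     body_parts = []
--     actions = []
--     time_words = []
--     severity = []
--     locations = []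
--
--     for word in words:
--         if word in SYMPTOM_WORDS:
--             symptoms.append(word)
--         elif word in TREATMENT_WORDS:
--             treatments.append(word)
--         elif word in MEDICAL_PERSONNEL:
--             personnel.append(word)
--         elif word in BODY_PARTS:
--             body_parts.append(word)
--         elif word in ACTION_WORDS:
--             actions.append(word)
--         elif word in TIME_WORDS:
--             time_words.append(word)
--         elif word in SEVERITY_WORDS:
--             severity.append(word)
--         elif word in LOCATION_WORDS:
--             locations.append(word)
--
--     return symptoms, treatments, personnel, body_parts, actions, time_words, severity, locations
-- ===== SOURCE B (Python) =====
-- SYMPTOM_WORDS = ['pain', 'headache', 'fever', 'nausea', 'dizzy', 'tired', 'cough', 'cold', 'flu', 'throat', 'chest', 'breathing', 'stomach', 'back', 'knee', 'shoulder', 'hurt', 'sick', 'bad', 'worse']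
-- TREATMENT_WORDS = ['medication', 'treatment', 'surgery', 'prescription', 'recovery', 'medicine', 'help', 'better']
-- MEDICAL_PERSONNEL = ['doctor', 'nurse', 'hospital', 'emergency']
-- BODY_PARTS = ['heart', 'lungs', 'throat', 'blood', 'pressure', 'head', 'body']
-- ACTION_WORDS = ['need', 'want', 'go', 'get', 'make', 'cannot', 'sleep', 'wake', 'work', 'move', 'walk', 'swallow', 'spin']
-- TIME_WORDS = ['yesterday', 'today', 'morning', 'night', 'week', 'now', 'start', 'continue']
-- SEVERITY_WORDS = ['very', 'too', 'much', 'high', 'hard', 'urgent']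
-- LOCATION_WORDS = ['pharmacy', 'hospital', 'emergency', 'room']
--
-- def categorize_words(words):
--     """Categorize medical words into different types.
--
--     Category-major: one filter pass over `words` per category, where a word
--     counts for a category only if no earlier-declared category already
--     claims it (so the elif priority of the original is preserved)."""
--     results = []
--     claimed = []  # all words belonging to earlier-declared categories
--     for cat in (SYMPTOM_WORDS, TREATMENT_WORDS, MEDICAL_PERSONNEL, BODY_PARTS,
--                 ACTION_WORDS, TIME_WORDS, SEVERITY_WORDS, LOCATION_WORDS):
--         results.append([w for w in words if w in cat and w not in claimed])
--         claimed = claimed + cat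
--     return tuple(results)
-- ===== Notes on version B (the rewrite author's own statement) =====
-- stated objective: alternative
-- what changed: Loop interchange: instead of one word-major pass dispatching each word through an 8-branch elif cascade, B iterates category-major, doing one filter pass over the words per category and excluding words already claimed by earlier-declared categories (preserving the elif priority).
import Mathlib
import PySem

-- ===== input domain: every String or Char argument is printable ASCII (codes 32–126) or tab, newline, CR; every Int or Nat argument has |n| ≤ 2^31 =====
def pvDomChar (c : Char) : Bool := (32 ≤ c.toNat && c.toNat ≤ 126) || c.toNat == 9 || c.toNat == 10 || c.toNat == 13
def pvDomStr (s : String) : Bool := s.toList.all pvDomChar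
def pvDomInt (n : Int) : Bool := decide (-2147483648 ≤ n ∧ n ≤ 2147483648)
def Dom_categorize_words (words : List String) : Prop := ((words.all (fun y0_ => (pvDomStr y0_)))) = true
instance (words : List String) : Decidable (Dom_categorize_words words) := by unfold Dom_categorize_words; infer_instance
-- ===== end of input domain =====

-- B replaces A's word-major elif-cascade pass with a category-major loop of per-category
-- filter passes excluding words claimed by earlier categories (alternative decomposition).

-- ===== PORT A =====
-- A classifies each word by an elif cascade of list memberships, appending to 8 lists.
def SYMPTOM_WORDS : List String := ["pain", "headache", "fever", "nausea", "dizzy", "tired", "cough", "cold", "flu", "throat", "chest", "breathing", "stomach", "back", "knee", "shoulder", "hurt", "sick", "bad", "worse"]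
def TREATMENT_WORDS : List String := ["medication", "treatment", "surgery", "prescription", "recovery", "medicine", "help", "better"]
def MEDICAL_PERSONNEL : List String := ["doctor", "nurse", "hospital", "emergency"]
def BODY_PARTS : List String := ["heart", "lungs", "throat", "blood", "pressure", "head", "body"]
def ACTION_WORDS : List String := ["need", "want", "go", "get", "make", "cannot", "sleep", "wake", "work", "move", "walk", "swallow", "spin"]
def TIME_WORDS : List String := ["yesterday", "today", "morning", "night", "week", "now", "start", "continue"]
def SEVERITY_WORDS : List String := ["very", "too", "much", "high", "hard", "urgent"]
def LOCATION_WORDS : List String := ["pharmacy", "hospital", "emergency", "room"]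

def pvStepA (acc : List String × List String × List String × List String × List String × List String × List String × List String) (word : String) : List String × List String × List String × List String × List String × List String × List String × List String :=
  match acc with
  | (s, t, p, b, a, ti, se, l) =>
    if SYMPTOM_WORDS.contains word then (s ++ [word], t, p, b, a, ti, se, l)
    else if TREATMENT_WORDS.contains word then (s, t ++ [word], p, b, a, ti, se, l)
    else if MEDICAL_PERSONNEL.contains word then (s, t, p ++ [word], b, a, ti, se, l)
    else if BODY_PARTS.contains word then (s, t, p, b ++ [word], a, ti, se, l)
    else if ACTION_WORDS.contains word then (s, t, p, b, a ++ [word], ti, se, l)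
    else if TIME_WORDS.contains word then (s, t, p, b, a, ti ++ [word], se, l)
    else if SEVERITY_WORDS.contains word then (s, t, p, b, a, ti, se ++ [word], l)
    else if LOCATION_WORDS.contains word then (s, t, p, b, a, ti, se, l ++ [word])
    else (s, t, p, b, a, ti, se, l)

def categorize_words (words : List String) : List String × List String × List String × List String × List String × List String × List String × List String :=
  words.foldl pvStepA ([], [], [], [], [], [], [], [])

-- ===== PORT B =====
-- B loops over the 8 categories (category-major), appending one filter pass over `words`
-- per category ("in cat and not in claimed"), while `claimed` accumulates earlier categories.
def pvStageB (words : List String) (st : List (List String) × List String) (cat : List String) : List (List String) × List String :=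
  (st.1 ++ [words.filter (fun w => cat.contains w && !st.2.contains w)], st.2 ++ cat)

def categorize_words_alt (words : List String) : List String × List String × List String × List String × List String × List String × List String × List String :=
  match ([SYMPTOM_WORDS, TREATMENT_WORDS, MEDICAL_PERSONNEL, BODY_PARTS, ACTION_WORDS, TIME_WORDS, SEVERITY_WORDS, LOCATION_WORDS].foldl (pvStageB words) ([], [])).1 with
  | [s, t, p, b, a, ti, se, l] => (s, t, p, b, a, ti, se, l)
  | _ => ([], [], [], [], [], [], [], [])  -- unreachable: the fold appends exactly 8 lists

-- ===== PRECONDITION & SPEC =====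
def Spec_categorize_words (words : List String) (out : List String × List String × List String × List String × List String × List String × List String × List String) : Prop := out = categorize_words_alt words
instance (words : List String) (out : List String × List String × List String × List String × List String × List String × List String × List String) : Decidable (Spec_categorize_words words out) := by
  unfold Spec_categorize_words
  haveI : DecidableEq (List String × List String) := instDecidableEqProd
  haveI : DecidableEq (List String × List String × List String) := instDecidableEqProd
  haveI : DecidableEq (List String × List String × List String × List String) := instDecidableEqProd
  haveI : DecidableEq (List String × List String × List String × List String × List String) := instDecidableEqProd
  haveI : DecidableEq (List String × List String × List String × List String × List String × List String) := instDecidableEqProd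
  haveI : DecidableEq (List String × List String × List String × List String × List String × List String × List String) := instDecidableEqProd
  haveI : DecidableEq (List String × List String × List String × List String × List String × List String × List String × List String) := instDecidableEqProd
  infer_instance

-- ===== CLAIM =====
def Claim_equal_categorize_words : Prop := ∀ (words : List String), Dom_categorize_words words → Spec_categorize_words words (categorize_words words)

-- ===== LEMMAS AND PROOFS =====

-- A's fold appends, bucket by bucket, exactly the filters by the elif conditions.
theorem pvA_foldl_char (ws : List String) (s t p b a ti se l : List String) :
    ws.foldl pvStepA (s, t, p, b, a, ti, se, l) =
      (s ++ ws.filter (fun w => SYMPTOM_WORDS.contains w),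
       t ++ ws.filter (fun w => !SYMPTOM_WORDS.contains w && TREATMENT_WORDS.contains w),
       p ++ ws.filter (fun w => !SYMPTOM_WORDS.contains w && !TREATMENT_WORDS.contains w && MEDICAL_PERSONNEL.contains w),
       b ++ ws.filter (fun w => !SYMPTOM_WORDS.contains w && !TREATMENT_WORDS.contains w && !MEDICAL_PERSONNEL.contains w && BODY_PARTS.contains w),
       a ++ ws.filter (fun w => !SYMPTOM_WORDS.contains w && !TREATMENT_WORDS.contains w && !MEDICAL_PERSONNEL.contains w && !BODY_PARTS.contains w && ACTION_WORDS.contains w),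
       ti ++ ws.filter (fun w => !SYMPTOM_WORDS.contains w && !TREATMENT_WORDS.contains w && !MEDICAL_PERSONNEL.contains w && !BODY_PARTS.contains w && !ACTION_WORDS.contains w && TIME_WORDS.contains w),
       se ++ ws.filter (fun w => !SYMPTOM_WORDS.contains w && !TREATMENT_WORDS.contains w && !MEDICAL_PERSONNEL.contains w && !BODY_PARTS.contains w && !ACTION_WORDS.contains w && !TIME_WORDS.contains w && SEVERITY_WORDS.contains w),
       l ++ ws.filter (fun w => !SYMPTOM_WORDS.contains w && !TREATMENT_WORDS.contains w && !MEDICAL_PERSONNEL.contains w && !BODY_PARTS.contains w && !ACTION_WORDS.contains w && !TIME_WORDS.contains w && !SEVERITY_WORDS.contains w && LOCATION_WORDS.contains w)) := by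
  induction ws generalizing s t p b a ti se l with
  | nil => simp
  | cons w ws ih =>
    simp only [List.foldl_cons, pvStepA]
    split_ifs with h1 h2 h3 h4 h5 h6 h7 h8 <;>
      rw [ih] <;> simp only [List.filter_cons]
    all_goals (simp_all; try tauto)

-- B's per-stage predicate "in cat and not in claimed" equals A's elif condition, word by word.
set_option maxHeartbeats 1000000 in
theorem pvB_char (words : List String) :
    categorize_words_alt words =
      (words.filter (fun w => SYMPTOM_WORDS.contains w),
       words.filter (fun w => !SYMPTOM_WORDS.contains w && TREATMENT_WORDS.contains w),
       words.filter (fun w => !SYMPTOM_WORDS.contains w && !TREATMENT_WORDS.contains w && MEDICAL_PERSONNEL.contains w),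
       words.filter (fun w => !SYMPTOM_WORDS.contains w && !TREATMENT_WORDS.contains w && !MEDICAL_PERSONNEL.contains w && BODY_PARTS.contains w),
       words.filter (fun w => !SYMPTOM_WORDS.contains w && !TREATMENT_WORDS.contains w && !MEDICAL_PERSONNEL.contains w && !BODY_PARTS.contains w && ACTION_WORDS.contains w),
       words.filter (fun w => !SYMPTOM_WORDS.contains w && !TREATMENT_WORDS.contains w && !MEDICAL_PERSONNEL.contains w && !BODY_PARTS.contains w && !ACTION_WORDS.contains w && TIME_WORDS.contains w),
       words.filter (fun w => !SYMPTOM_WORDS.contains w && !TREATMENT_WORDS.contains w && !MEDICAL_PERSONNEL.contains w && !BODY_PARTS.contains w && !ACTION_WORDS.contains w && !TIME_WORDS.contains w && SEVERITY_WORDS.contains w),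
       words.filter (fun w => !SYMPTOM_WORDS.contains w && !TREATMENT_WORDS.contains w && !MEDICAL_PERSONNEL.contains w && !BODY_PARTS.contains w && !ACTION_WORDS.contains w && !TIME_WORDS.contains w && !SEVERITY_WORDS.contains w && LOCATION_WORDS.contains w)) := by
  have h : categorize_words_alt words =
      (words.filter (fun w => SYMPTOM_WORDS.contains w && !([] : List String).contains w),
       words.filter (fun w => TREATMENT_WORDS.contains w && !(SYMPTOM_WORDS).contains w),
       words.filter (fun w => MEDICAL_PERSONNEL.contains w && !(SYMPTOM_WORDS ++ TREATMENT_WORDS).contains w),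
       words.filter (fun w => BODY_PARTS.contains w && !(SYMPTOM_WORDS ++ TREATMENT_WORDS ++ MEDICAL_PERSONNEL).contains w),
       words.filter (fun w => ACTION_WORDS.contains w && !(SYMPTOM_WORDS ++ TREATMENT_WORDS ++ MEDICAL_PERSONNEL ++ BODY_PARTS).contains w),
       words.filter (fun w => TIME_WORDS.contains w && !(SYMPTOM_WORDS ++ TREATMENT_WORDS ++ MEDICAL_PERSONNEL ++ BODY_PARTS ++ ACTION_WORDS).contains w),
       words.filter (fun w => SEVERITY_WORDS.contains w && !(SYMPTOM_WORDS ++ TREATMENT_WORDS ++ MEDICAL_PERSONNEL ++ BODY_PARTS ++ ACTION_WORDS ++ TIME_WORDS).contains w),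
       words.filter (fun w => LOCATION_WORDS.contains w && !(SYMPTOM_WORDS ++ TREATMENT_WORDS ++ MEDICAL_PERSONNEL ++ BODY_PARTS ++ ACTION_WORDS ++ TIME_WORDS ++ SEVERITY_WORDS).contains w)) := rfl
  rw [h]
  refine congrArg₂ _ ?_ (congrArg₂ _ ?_ (congrArg₂ _ ?_ (congrArg₂ _ ?_ (congrArg₂ _ ?_ (congrArg₂ _ ?_ (congrArg₂ _ ?_ ?_)))))) <;>
    refine List.filter_congr (fun w _ => ?_) <;>
    simp [List.contains_append, Bool.not_or, Bool.and_comm, Bool.and_left_comm, Bool.and_assoc]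

-- ===== VERDICT =====
theorem categorize_words_spec : Claim_equal_categorize_words := by
  intro words _
  show categorize_words words = categorize_words_alt words
  rw [categorize_words, pvA_foldl_char, pvB_char]
  simp
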